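-- pv_equiv track=rewrite | github.com/harrywu666/ccad | cad-review-backend/services/audit_runtime/master_agent_health.py | _consecutive_master_replans
-- ===== SOURCE A (Python) =====
-- from typing import Any, Dict, List
--
-- def _consecutive_master_replans(recent_events: List[Dict[str, Any]]) -> int:
--     streak = 0
--     for event in reversed(recent_events):
--         event_kind = str(event.get("event_kind") or "").strip()
--         agent_key = str(event.get("agent_key") or "").strip()
--         if agent_key != "master_planner_agent":
--             continue
--         if event_kind == "master_replan_requested":
--             streak += 1
--             continue
--         break
--     return streak
-- ===== SOURCE B (Python) =====
-- from typing import Any, Dict, List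
--
-- def _consecutive_master_replans(recent_events: List[Dict[str, Any]]) -> int:
--     # Pass 1: normalized event kinds of master-planner events, in order.
--     kinds = [
--         str(event.get("event_kind") or "").strip()
--         for event in recent_events
--         if str(event.get("agent_key") or "").strip() == "master_planner_agent"
--     ]
--     # Pass 2: forward fold with reset; final run = length of trailing run.
--     run = 0
--     for kind in kinds:
--         run = run + 1 if kind == "master_replan_requested" else 0
--     return run
-- ===== Notes on version B (the rewrite author's own statement) =====
-- stated objective: alternative
-- what changed: Replaces A's single reversed skip/break scan by a two-phase decomposition: first build the ordered list of normalized event kinds of master-planner events, then compute the trailing-run length with a forward fold that resets on mismatch (no reversal, no break).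
import Mathlib
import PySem

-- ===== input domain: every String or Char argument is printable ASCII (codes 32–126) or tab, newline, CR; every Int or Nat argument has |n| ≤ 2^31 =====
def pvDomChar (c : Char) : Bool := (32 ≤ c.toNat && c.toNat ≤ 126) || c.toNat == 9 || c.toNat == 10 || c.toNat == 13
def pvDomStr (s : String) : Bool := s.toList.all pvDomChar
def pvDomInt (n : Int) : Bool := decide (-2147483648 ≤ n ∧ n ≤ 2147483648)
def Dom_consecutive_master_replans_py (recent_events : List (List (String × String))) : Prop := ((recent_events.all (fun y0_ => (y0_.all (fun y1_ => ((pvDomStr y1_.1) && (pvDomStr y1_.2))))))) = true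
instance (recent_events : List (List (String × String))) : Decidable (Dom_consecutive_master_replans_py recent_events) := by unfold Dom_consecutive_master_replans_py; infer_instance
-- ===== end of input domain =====

-- B rewrites A's single reversed skip/break scan as filter-then-forward-fold-with-reset (alternative decomposition, same cost).

-- ===== PORT A =====
-- str(event.get(k) or "").strip(): first-match lookup, "" on missing (and "" is falsy so `or ""` is absorbed), then strip
def pvNorm (e : List (String × String)) (k : String) : String :=
  PySem.Str.strip (((e.find? (fun p => p.1 == k)).map Prod.snd).getD "")

-- the `for event in reversed(recent_events)` loop, with `continue`/`break` as structural recursion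
def pvLoopA : List (List (String × String)) → Int → Int
  | [], streak => streak
  | e :: rest, streak =>
    let event_kind := pvNorm e "event_kind"
    let agent_key := pvNorm e "agent_key"
    if agent_key ≠ "master_planner_agent" then pvLoopA rest streak
    else if event_kind = "master_replan_requested" then pvLoopA rest (streak + 1)
    else streak

def consecutive_master_replans_py (recent_events : List (List (String × String))) : Int :=
  pvLoopA recent_events.reverse 0

-- ===== PORT B =====
def consecutive_master_replans_py_alt (recent_events : List (List (String × String))) : Int :=
  let kinds := (recent_events.filter
      (fun e => pvNorm e "agent_key" = "master_planner_agent")).map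
      (fun e => pvNorm e "event_kind")
  kinds.foldl (fun run kind => if kind = "master_replan_requested" then run + 1 else 0) 0

-- ===== PRECONDITION & SPEC =====
def Spec_consecutive_master_replans_py (recent_events : List (List (String × String))) (out : Int) : Prop := out = consecutive_master_replans_py_alt recent_events
instance (recent_events : List (List (String × String))) (out : Int) : Decidable (Spec_consecutive_master_replans_py recent_events out) := by unfold Spec_consecutive_master_replans_py; infer_instance

-- ===== CLAIM (what is proved, stated in full; the proofs are below) =====
def Claim_equal_consecutive_master_replans_py : Prop := ∀ (recent_events : List (List (String × String))), Dom_consecutive_master_replans_py recent_events → Spec_consecutive_master_replans_py recent_events (consecutive_master_replans_py recent_events)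

-- ===== LEMMAS AND PROOFS =====

-- non-accumulator characterization of A's loop
def pvF : List (List (String × String)) → Int
  | [] => 0
  | e :: rest =>
    if pvNorm e "agent_key" ≠ "master_planner_agent" then pvF rest
    else if pvNorm e "event_kind" = "master_replan_requested" then 1 + pvF rest
    else 0

theorem pvLoopA_eq (l : List (List (String × String))) :
    ∀ s, pvLoopA l s = s + pvF l := by
  induction l with
  | nil => intro s; simp [pvLoopA, pvF]
  | cons e rest ih =>
    intro s
    simp only [pvLoopA, pvF]
    split_ifs with h1 h2 <;> simp [ih] <;> try omega

def pvStep (run : Int) (kind : String) : Int :=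
  if kind = "master_replan_requested" then run + 1 else 0

def pvG (l : List (List (String × String))) : Int :=
  ((l.filter (fun e => pvNorm e "agent_key" = "master_planner_agent")).map
      (fun e => pvNorm e "event_kind")).foldl pvStep 0

theorem pvF_eq_pvG_reverse (l : List (List (String × String))) :
    pvF l = pvG l.reverse := by
  induction l with
  | nil => simp [pvF, pvG]
  | cons e rest ih =>
    simp only [pvF, List.reverse_cons, pvG, List.filter_append, List.map_append,
      List.foldl_append] at *
    by_cases hp : pvNorm e "agent_key" = "master_planner_agent"
    · by_cases hk : pvNorm e "event_kind" = "master_replan_requested"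
      · simp [hp, hk, ih, pvStep]; omega
      · simp [hp, hk, pvStep]
    · simp [hp, ih]

-- ===== VERDICT (by name: the statement is the Claim_ definition above) =====
theorem consecutive_master_replans_py_spec : Claim_equal_consecutive_master_replans_py := by
  intro recent_events _
  show consecutive_master_replans_py recent_events = consecutive_master_replans_py_alt recent_events
  have h := pvF_eq_pvG_reverse recent_events.reverse
  rw [List.reverse_reverse] at h
  have e2 : (fun (run : Int) (kind : String) =>
      if kind = "master_replan_requested" then run + 1 else 0) = pvStep := by
    funext r k; rfl
  simp only [consecutive_master_replans_py, consecutive_master_replans_py_alt,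
    pvLoopA_eq, h, pvG, e2]
  omega
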